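-- pv_equiv track=rewrite | github.com/golovnyakpa/PythonScripts | symbol/lab1_v2.py | buildSFunction
-- ===== SOURCE A (Python) =====
-- def anf(function):
--     buff = []
--     iterations = len(function)
--     ANF = [ function[0] ]
--     for _ in range(iterations-1):
--         for i in range(len(function)-1):
--             buff.append(function[i]^function[i+1])
--         ANF.append(buff[0])
--         function = buff
--         buff = []
--     return ANF
--
-- def functionValue(function):
--     values = [ [] for _ in range(len(bin(max(function))[2:]))]
--     for value in function:
--         for function_number in range(len(bin(max(function))[2:])):
--             values[function_number].append(value >> function_number & 1)
--     return values
--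
-- def generateMonoms(n):
-- 	monoms = ['1']
-- 	x = 1
-- 	for i in range(2 ** n - 1):
-- 		mon = ''
-- 		for j in range(n):
-- 			if x >> j & 1:
-- 				mon += 'x' + str(j)
-- 		monoms.append(mon)
-- 		x += 1
-- 	return(monoms)
--
-- def buildSFunction(function):
--     answer = ''
--     num_of_bits = len(bin(max(function))[2:])
--     monoms = generateMonoms(num_of_bits)
--     print_yi = "y{}"
--     counter = 0
--     for i in range(num_of_bits):
--         answer += print_yi.format(counter) + ' = '
--         coefficients = functionValue(anf(function))[i]
--         for j in range(len(function)):
--             if coefficients[j]: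
--                 answer += monoms[j] + ' ⊕ '
--         counter += 1
--         answer = answer[0:len(answer) - 3:]
--         answer += '\n'
--     return(answer)
-- ===== SOURCE B (Python) =====
-- def _monom(j):
--     if j == 0:
--         return '1'
--     return ''.join('x%d' % b for b in range(j.bit_length()) if j >> b & 1)
--
--
-- def _coeff(function, k):
--     c = 0
--     for j in range(k + 1):
--         if j & k == j:
--             c ^= function[j]
--     return c
--
--
-- def _line(i, coeffs, n):
--     mons = [_monom(j) for j in range(n) if coeffs[j] >> i & 1]
--     return 'y%d = %s' % (i, ' \u2295 '.join(mons)) if mons else 'y%d' % i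
--
--
-- def buildSFunction(function):
--     num_of_bits = len(bin(max(function))[2:])
--     n = len(function)
--     # Zhegalkin coefficients in closed form: coeff[k] = XOR of function[j] over submasks j of k
--     coeffs = [_coeff(function, k) for k in range(n)]
--     lines = [_line(i, coeffs, n) for i in range(num_of_bits)]
--     return '\n'.join(lines) + '\n'
-- ===== Notes on version B (the rewrite author's own statement) =====
-- stated objective: faster
-- what changed: Replaces A's per-output-bit recomputation of the XOR difference triangle and its 2^bits-entry monomial table with one closed-form Moebius pass (coeff[k] = XOR of function[j] over submasks j of k) and on-demand monomial names, assembling each line with join.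
import Mathlib
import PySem

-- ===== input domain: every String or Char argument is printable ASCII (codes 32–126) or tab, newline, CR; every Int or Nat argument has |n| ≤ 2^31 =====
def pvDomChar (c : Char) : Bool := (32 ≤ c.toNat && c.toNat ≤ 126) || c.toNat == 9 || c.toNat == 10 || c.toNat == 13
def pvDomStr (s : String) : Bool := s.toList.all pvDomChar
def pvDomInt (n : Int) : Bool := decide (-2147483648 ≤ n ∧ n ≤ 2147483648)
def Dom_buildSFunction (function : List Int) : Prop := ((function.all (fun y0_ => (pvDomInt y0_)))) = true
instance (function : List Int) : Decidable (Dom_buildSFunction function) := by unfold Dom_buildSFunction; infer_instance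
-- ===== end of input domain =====

-- B computes the ANF coefficients once in closed form (submask XOR) instead of re-running the
-- O(n^2) difference triangle for every output bit, and names only the n needed monomials instead
-- of tabulating all 2^bits of them (objective: faster).


-- len(bin(m)[2:]) — the shared 'number of bits' expression of both programs
def pvNB (m : Int) : Nat := ((PySem.Int.toBinChars0b m).drop 2).length

-- ===== PORT A =====
-- A's helper anf: repeatedly replaces the list by adjacent XORs, collecting the heads.
def anfP (function : List Int) : List Int :=
  let iterations := function.length
  ((List.range (iterations - 1)).foldl
    (fun (st : List Int × List Int) _ =>
      let f := st.2
      let buff := (List.range (f.length - 1)).foldl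
        (fun buff (i : Nat) =>
          buff ++ [PySem.Int.bxor (PySem.List.pyGetD f (i : Int) 0) (PySem.List.pyGetD f ((i : Int) + 1) 0)]) []
      (st.1 ++ [PySem.List.pyGetD buff 0 0], buff))
    ([PySem.List.pyGetD function 0 0], function)).1

-- A's helper functionValue: splits a list of ints into bit-plane rows.
def functionValueP (function : List Int) : List (List Int) :=
  let rows := pvNB ((PySem.List.max? function id).getD 0)
  function.foldl
    (fun values (value : Int) =>
      (List.range rows).foldl
        (fun values (fn : Nat) =>
          PySem.List.pySetD values (fn : Int)
            (PySem.List.pyGetD values (fn : Int) [] ++ [PySem.Int.band (value >>> fn) 1]))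
        values)
    (List.replicate rows ([] : List Int))

-- A's helper generateMonoms: tabulates all 2^n monomial names, with a running counter x.
def generateMonomsP (n : Nat) : List (List Char) :=
  ((List.range (2 ^ n - 1)).foldl
    (fun (st : List (List Char) × Int) _ =>
      let mon := (List.range n).foldl
        (fun mon (j : Nat) =>
          if PySem.Int.band (st.2 >>> j) 1 ≠ 0 then mon ++ ('x' :: PySem.Int.toChars (j : Int)) else mon)
        []
      (st.1 ++ [mon], st.2 + 1))
    ([[ '1' ]], 1)).1

def buildSFunction (function : List Int) : String :=
  let num_of_bits := pvNB ((PySem.List.max? function id).getD 0)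
  let monoms := generateMonomsP num_of_bits
  let res := (List.range num_of_bits).foldl
    (fun (st : List Char × Int) (i : Nat) =>
      let answer := st.1 ++ ('y' :: PySem.Int.toChars st.2) ++ (' ' :: '=' :: ' ' :: [])
      let coefficients := PySem.List.pyGetD (functionValueP (anfP function)) (i : Int) []
      let answer := (List.range function.length).foldl
        (fun answer (j : Nat) =>
          if PySem.List.pyGetD coefficients (j : Int) 0 ≠ 0 then
            answer ++ PySem.List.pyGetD monoms (j : Int) [] ++ (' ' :: '⊕' :: ' ' :: [])
          else answer)
        answer
      let answer := PySem.List.slice answer (some 0) (some ((answer.length : Int) - 3))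
      (answer ++ ['\n'], st.2 + 1))
    ([], 0)
  String.ofList res.1

-- ===== PORT B =====
-- B's helper _monom: the name of monomial j, from j's set bits.
def monomB (j : Nat) : List Char :=
  if j = 0 then ['1']
  else
    ((List.range (PySem.Int.bitLength (j : Int))).filter
      (fun (b : Nat) => PySem.Int.band ((j : Int) >>> b) 1 ≠ 0)).flatMap
      (fun (b : Nat) => 'x' :: PySem.Int.toChars (b : Int))

-- B's helper _coeff: closed-form Zhegalkin coefficient k = XOR of function[j] over submasks j of k.
def coeffB (function : List Int) (k : Nat) : Int :=
  (List.range (k + 1)).foldl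
    (fun c (j : Nat) =>
      if PySem.Int.band (j : Int) (k : Int) = (j : Int) then
        PySem.Int.bxor c (PySem.List.pyGetD function (j : Int) 0)
      else c)
    0

-- B's helper _line: one output line.
def lineB (i : Nat) (coeffs : List Int) (n : Nat) : List Char :=
  let mons := ((List.range n).filter
      (fun (j : Nat) => PySem.Int.band (PySem.List.pyGetD coeffs (j : Int) 0 >>> i) 1 ≠ 0)).map monomB
  if mons ≠ [] then
    ('y' :: PySem.Int.toChars (i : Int)) ++ (' ' :: '=' :: ' ' :: []) ++
      List.intercalate (' ' :: '⊕' :: ' ' :: []) mons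
  else 'y' :: PySem.Int.toChars (i : Int)

def buildSFunction_alt (function : List Int) : String :=
  let num_of_bits := pvNB ((PySem.List.max? function id).getD 0)
  let n := function.length
  let coeffs := (List.range n).map (coeffB function)
  let lines := (List.range num_of_bits).map (fun i => lineB i coeffs n)
  String.ofList (List.intercalate ['\n'] lines ++ ['\n'])

-- ===== PRECONDITION & SPEC =====
-- Spec-level closed form (the standard Möbius/Zhegalkin formula) for the coefficients A's
-- triangle produces: coefficient k is the XOR of function[j] over the submasks j of k.
-- It is a formula on the input, used only to STATE where A's indexing raises.
def pvZ (f : List Int) (k : Nat) : Int :=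
  (List.range (k + 1)).foldl
    (fun c j => if j &&& k = j then PySem.Int.bxor c (f.getD j 0) else c) 0

-- Pre_ is EXACTLY the set of inputs on which A returns normally: the list is nonempty (else
-- max raises ValueError), the bin-length of the largest ANF coefficient is not smaller than
-- num_of_bits (else functionValue(anf(function))[i] raises IndexError), and no ANF coefficient
-- at an index ≥ 2^num_of_bits has a bit below num_of_bits set (else monoms[j] raises IndexError).
def Pre_buildSFunction (function : List Int) : Prop :=
  function ≠ [] ∧
  pvNB ((PySem.List.max? function id).getD 0) ≤
    pvNB ((PySem.List.max? ((List.range function.length).map (pvZ function)) id).getD 0) ∧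
  ∀ j < function.length, 2 ^ pvNB ((PySem.List.max? function id).getD 0) ≤ j →
    ∀ i < pvNB ((PySem.List.max? function id).getD 0),
      PySem.Int.band (pvZ function j >>> i) 1 = 0

instance (function : List Int) : Decidable (Pre_buildSFunction function) := by
  unfold Pre_buildSFunction; infer_instance

def pvWitness_buildSFunction : List Int := [3, 1]

def Spec_buildSFunction (function : List Int) (out : String) : Prop := out = buildSFunction_alt function
instance (function : List Int) (out : String) : Decidable (Spec_buildSFunction function out) := by
  unfold Spec_buildSFunction; infer_instance

-- ===== CLAIM (what is proved, stated in full; the proofs are below) =====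
def Claim_equal_buildSFunction : Prop :=
  ∀ (function : List Int), Dom_buildSFunction function → Pre_buildSFunction function →
    Spec_buildSFunction function (buildSFunction function)

-- ===== LEMMAS AND PROOFS =====

-- 0/1 indicator into ZMod 2
def pvInd (b : Bool) : ZMod 2 := if b then 1 else 0

-- bit b of the j-th entry
def pvBit (l : List Int) (b j : Nat) : ZMod 2 := pvInd ((l.getD j 0).testBit b)

-- one step of A's difference triangle
def pvStep (l : List Int) : List Int :=
  (List.range (l.length - 1)).map (fun i => PySem.Int.bxor (l.getD i 0) (l.getD (i + 1) 0))

theorem pvInd_xor (a b : Bool) : pvInd (a ^^ b) = pvInd a + pvInd b := by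
  cases a <;> cases b <;> decide

theorem pvInd_eq_iff {a b : Bool} : pvInd a = pvInd b ↔ a = b := by
  cases a <;> cases b <;> simp [pvInd]

-- Int.testBit on the two constructors (definitional)
theorem pv_testBit_ofNat (m : Nat) (i : Nat) : (Int.ofNat m).testBit i = m.testBit i := rfl
theorem pv_testBit_negSucc (m : Nat) (i : Nat) : (Int.negSucc m).testBit i = !(m.testBit i) := rfl

theorem pv_testBit_ge_size (v b : Nat) (h : v.size ≤ b) : v.testBit b = false :=
  Nat.testBit_eq_false_of_lt (lt_of_lt_of_le (Nat.lt_size_self v) (Nat.pow_le_pow_right (by omega) h))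

-- all-bits-equal extensionality for Int
theorem pv_ext (a b : Int) (h : ∀ i, a.testBit i = b.testBit i) : a = b := by
  have key : ∀ (m n : Nat), (∀ i, (Int.ofNat m).testBit i = (Int.negSucc n).testBit i) → False := by
    intro m n hh
    have h1 := hh (max m.size n.size)
    rw [pv_testBit_ofNat, pv_testBit_negSucc,
      pv_testBit_ge_size m _ (le_max_left _ _), pv_testBit_ge_size n _ (le_max_right _ _)] at h1
    simp at h1
  cases a with
  | ofNat m =>
    cases b with
    | ofNat n =>
      have : m = n := Nat.eq_of_testBit_eq (fun i => h i)
      rw [this]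
    | negSucc n => exact absurd h (fun hh => key m n hh)
  | negSucc m =>
    cases b with
    | ofNat n => exact absurd (fun i => (h i).symm) (fun hh => key n m hh)
    | negSucc n =>
      have : m = n := Nat.eq_of_testBit_eq (fun i => by
        have h1 := h i
        rw [pv_testBit_negSucc, pv_testBit_negSucc] at h1
        exact Bool.not_inj h1)
      rw [this]

theorem pv_toNat_ofNat (m : Nat) : (Int.ofNat m).toNat = m := rfl

theorem pv_negSucc_helper (n : Nat) : (-Int.negSucc n - 1).toNat = n := by
  have : (-Int.negSucc n - 1) = (n : Int) := by rw [Int.negSucc_eq]; ring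
  rw [this, Int.toNat_natCast]

-- bits of PySem's Python-exact xor
theorem pv_testBit_bxor (a b : Int) (i : Nat) :
    (PySem.Int.bxor a b).testBit i = (a.testBit i ^^ b.testBit i) := by
  cases a with
  | ofNat m =>
    cases b with
    | ofNat n =>
      have h1 : PySem.Int.bxor (Int.ofNat m) (Int.ofNat n) = Int.ofNat (m ^^^ n) := by
        simp [PySem.Int.bxor]
      rw [h1, pv_testBit_ofNat, pv_testBit_ofNat, pv_testBit_ofNat, Nat.testBit_xor]
    | negSucc n =>
      have h1 : PySem.Int.bxor (Int.ofNat m) (Int.negSucc n) = Int.negSucc (m ^^^ n) := by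
        simp only [PySem.Int.bxor]
        rw [if_pos (by exact Int.ofNat_nonneg m), if_neg (by exact Int.not_le.mpr (Int.negSucc_lt_zero n))]
        rw [pv_negSucc_helper, Int.negSucc_eq, pv_toNat_ofNat]
        push_cast
        ring
      rw [h1, pv_testBit_ofNat, pv_testBit_negSucc, pv_testBit_negSucc, Nat.testBit_xor]
      cases m.testBit i <;> cases n.testBit i <;> rfl
  | negSucc m =>
    cases b with
    | ofNat n =>
      have h1 : PySem.Int.bxor (Int.negSucc m) (Int.ofNat n) = Int.negSucc (m ^^^ n) := by
        simp only [PySem.Int.bxor]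
        rw [if_neg (by exact Int.not_le.mpr (Int.negSucc_lt_zero m))]
        rw [if_pos (by exact Int.ofNat_nonneg n)]
        rw [pv_negSucc_helper, Int.negSucc_eq, pv_toNat_ofNat]
        push_cast
        ring
      rw [h1, pv_testBit_negSucc, pv_testBit_negSucc, pv_testBit_ofNat, Nat.testBit_xor]
      cases m.testBit i <;> cases n.testBit i <;> rfl
    | negSucc n =>
      have h1 : PySem.Int.bxor (Int.negSucc m) (Int.negSucc n) = Int.ofNat (m ^^^ n) := by
        simp only [PySem.Int.bxor]
        rw [if_neg (by exact Int.not_le.mpr (Int.negSucc_lt_zero m))]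
        rw [if_neg (by exact Int.not_le.mpr (Int.negSucc_lt_zero n))]
        rw [pv_negSucc_helper, pv_negSucc_helper]
        rfl
      rw [h1, pv_testBit_ofNat, pv_testBit_negSucc, pv_testBit_negSucc, Nat.testBit_xor]
      cases m.testBit i <;> cases n.testBit i <;> rfl

theorem pv_shift_and_one (x i : Nat) : (x >>> i) &&& 1 = if x.testBit i then 1 else 0 := by
  rw [Nat.testBit, Nat.and_one_is_mod, Nat.and_comm 1 (x >>> i), Nat.and_one_is_mod]
  rcases Nat.mod_two_eq_zero_or_one (x >>> i) with h | h <;> simp [h]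

-- Python's '& 1' reads bit 0, also on negatives
theorem pv_band1 (x : Int) : PySem.Int.band x 1 = if x.testBit 0 then 1 else 0 := by
  cases x with
  | ofNat m =>
    have h1 : PySem.Int.band (Int.ofNat m) 1 = Int.ofNat (m &&& 1) := by
      have := PySem.Int.band_natCast m 1
      exact_mod_cast this
    rw [h1, pv_testBit_ofNat]
    rw [show m &&& 1 = (m >>> 0) &&& 1 from rfl, pv_shift_and_one]
    split_ifs <;> rfl
  | negSucc m =>
    have h1 : PySem.Int.band (Int.negSucc m) 1 = Int.ofNat (1 - (1 &&& m)) := by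
      simp only [PySem.Int.band]
      rw [if_neg (by exact Int.not_le.mpr (Int.negSucc_lt_zero m))]
      rw [if_pos (by norm_num)]
      rw [pv_negSucc_helper]
      rfl
    rw [h1, pv_testBit_negSucc]
    rw [Nat.and_comm 1 m, show m &&& 1 = (m >>> 0) &&& 1 from rfl, pv_shift_and_one]
    cases h : m.testBit 0 <;> rfl

-- shifting moves the bit index, also on negatives
theorem pv_testBit_shiftRight (x : Int) (b k : Nat) : (x >>> b).testBit k = x.testBit (b + k) := by
  cases x with
  | ofNat m =>
    rw [show (Int.ofNat m) >>> b = Int.ofNat (m >>> b) from rfl, pv_testBit_ofNat,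
      pv_testBit_ofNat, Nat.testBit_shiftRight]
  | negSucc m =>
    rw [show (Int.negSucc m) >>> b = Int.negSucc (m >>> b) from rfl, pv_testBit_negSucc,
      pv_testBit_negSucc, Nat.testBit_shiftRight]

-- the guard '(v >> i) & 1 != 0' IS Int.testBit
theorem pv_cond_bitI (x : Int) (i : Nat) :
    (PySem.Int.band (x >>> i) 1 ≠ 0) ↔ x.testBit i = true := by
  rw [pv_band1 (x >>> i), show (x >>> i).testBit 0 = x.testBit i from by
    rw [pv_testBit_shiftRight]; ring_nf]
  split_ifs with h <;> simp [h]

-- List.range sums into Finset sums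
theorem pv_sum_range (n : Nat) (f : Nat → ZMod 2) :
    ((List.range n).map f).sum = ∑ j ∈ Finset.range n, f j := by
  induction n with
  | zero => simp
  | succ n ih => rw [List.range_succ, Finset.sum_range_succ, List.map_append, List.sum_append, ih]; simp

-- generic: bit b of an if-guarded XOR fold is a ZMod-2 sum
theorem pv_testBit_foldl (js : List Nat) (p : Nat → Prop) [DecidablePred p]
    (x : Nat → Int) (a : Int) (b : Nat) :
    pvInd ((js.foldl (fun a j => if p j then PySem.Int.bxor a (x j) else a) a).testBit b)
      = pvInd (a.testBit b) + (js.map (fun j => if p j then pvInd ((x j).testBit b) else 0)).sum := by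
  induction js generalizing a with
  | nil => simp
  | cons j js ih =>
    simp only [List.foldl_cons, List.map_cons, List.sum_cons]
    by_cases hp : p j
    · rw [if_pos hp, if_pos hp, ih, pv_testBit_bxor, pvInd_xor]; ring
    · rw [if_neg hp, if_neg hp, ih, zero_add]

-- Nat.size recurrence
theorem pv_size_div2 (n : Nat) (h : 1 ≤ n) : Nat.size n = Nat.size (n / 2) + 1 := by
  rcases Nat.lt_or_ge n 2 with h2 | h2
  · interval_cases n <;> simp
  · have hd : 1 ≤ n / 2 := by omega
    have hs : 0 < (n / 2).size := Nat.size_pos.mpr hd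
    have hub : n < 2 ^ ((n / 2).size + 1) := by
      have h1 : n / 2 + 1 ≤ 2 ^ (n / 2).size := Nat.lt_size_self (n / 2)
      calc n < 2 * (n / 2) + 2 := by omega
        _ ≤ 2 * 2 ^ (n / 2).size := by omega
        _ = 2 ^ ((n / 2).size + 1) := by ring
    have hlb : 2 ^ (n / 2).size ≤ n := by
      have h1 : 2 ^ ((n / 2).size - 1) ≤ n / 2 := Nat.lt_size.mp (by omega)
      have h3 : 2 ^ ((n / 2).size - 1) * 2 ≤ n := by omega
      calc 2 ^ (n / 2).size = 2 ^ ((n / 2).size - 1) * 2 := by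
            rw [← pow_succ]; congr 1; omega
        _ ≤ n := h3
    have := Nat.size_le.mpr hub
    have := Nat.lt_size.mpr hlb
    omega

-- Python's bit_length is Nat.size on naturals
theorem pv_bitLength_eq_size (m : Nat) : PySem.Int.bitLength (m : Int) = Nat.size m := by
  induction m using Nat.strong_induction_on with
  | _ m ih =>
    rcases Nat.eq_zero_or_pos m with h0 | h0
    · subst h0; simp [PySem.Int.bitLength_zero]
    · rw [PySem.Int.bitLength_natCast h0, ih (m / 2) (by omega), pv_size_div2 m h0]

-- submask test distributes over parity/halving
theorem pv_submask_iff (j k : Nat) :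
    j &&& k = j ↔ (j % 2 ≤ k % 2 ∧ j / 2 &&& k / 2 = j / 2) := by
  constructor
  · intro h
    constructor
    · have h2 := congrArg (fun x => x.testBit 0) h
      simp only [Nat.testBit_and] at h2
      simp only [Nat.testBit_zero] at h2
      by_cases hj : j % 2 = 1 <;> by_cases hk : k % 2 = 1 <;> simp [hj, hk] at h2 ⊢ <;> omega
    · apply Nat.eq_of_testBit_eq
      intro b
      have h2 := congrArg (fun x => x.testBit (b + 1)) h
      simp only [Nat.testBit_and] at h2
      simp only [Nat.testBit_div_two, Nat.testBit_and, h2]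
  · rintro ⟨h1, h2⟩
    apply Nat.eq_of_testBit_eq
    intro b
    cases b with
    | zero =>
      simp only [Nat.testBit_and, Nat.testBit_zero]
      by_cases hj : j % 2 = 1 <;> by_cases hk : k % 2 = 1 <;> simp [hj, hk] <;> omega
    | succ b =>
      have := congrArg (fun x => x.testBit b) h2
      simp only [Nat.testBit_and, Nat.testBit_div_two] at this
      simp only [Nat.testBit_and, this]

-- Lucas's theorem mod 2: an odd binomial coefficient means a submask
theorem pv_lucas (k j : Nat) :
    ((Nat.choose k j : Nat) : ZMod 2) = if j &&& k = j then 1 else 0 := by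
  haveI : Fact (Nat.Prime 2) := ⟨Nat.prime_two⟩
  induction k using Nat.strong_induction_on generalizing j with
  | _ k ih =>
    rcases Nat.eq_zero_or_pos k with h0 | h0
    · subst h0
      cases j with
      | zero => simp
      | succ j =>
        rw [Nat.choose_eq_zero_of_lt (by omega)]
        have : ¬ ((j + 1) &&& 0 = j + 1) := by simp [Nat.and_zero]
        simp [this]
    · have hstep : ((Nat.choose k j : Nat) : ZMod 2)
          = ((Nat.choose (k % 2) (j % 2) * Nat.choose (k / 2) (j / 2) : Nat) : ZMod 2) :=
        (ZMod.natCast_eq_natCast_iff _ _ _).mpr Choose.choose_modEq_choose_mod_mul_choose_div_nat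
      rw [hstep, Nat.cast_mul, ih (k / 2) (by omega) (j / 2)]
      have hsmall : ((Nat.choose (k % 2) (j % 2) : Nat) : ZMod 2)
          = if j % 2 ≤ k % 2 then 1 else 0 := by
        have hk2 : k % 2 = 0 ∨ k % 2 = 1 := by omega
        have hj2 : j % 2 = 0 ∨ j % 2 = 1 := by omega
        rcases hk2 with h | h <;> rcases hj2 with h' | h' <;> simp [h, h']
      rw [hsmall]
      by_cases h1 : j % 2 ≤ k % 2 <;> by_cases h2 : j / 2 &&& k / 2 = j / 2 <;>
        simp [h1, h2, pv_submask_iff j k]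

-- length bookkeeping for the triangle
theorem pv_length_step (l : List Int) : (pvStep l).length = l.length - 1 := by
  simp [pvStep]

-- the binomial row sum
def pvA (l : List Int) (b k i : Nat) : ZMod 2 :=
  ∑ j ∈ Finset.range (k + 1), ((Nat.choose k j : Nat) : ZMod 2) * pvBit l b (i + j)

-- Pascal recurrence for the binomial parity row sum
theorem pv_pascal (l : List Int) (b k i : Nat) :
    pvA l b (k + 1) i = pvA l b k i + pvA l b k (i + 1) := by
  have key : pvA l b k i
      = ∑ j ∈ Finset.range k, ((Nat.choose k (j+1) : Nat) : ZMod 2) * pvBit l b (i + (j+1))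
        + ((Nat.choose k 0 : Nat) : ZMod 2) * pvBit l b (i + 0) :=
    Finset.sum_range_succ' (fun j => ((Nat.choose k j : Nat) : ZMod 2) * pvBit l b (i + j)) k
  have hA : pvA l b (k + 1) i
      = ∑ j ∈ Finset.range (k+1), ((Nat.choose (k+1) (j+1) : Nat) : ZMod 2) * pvBit l b (i + (j+1))
        + ((Nat.choose (k+1) 0 : Nat) : ZMod 2) * pvBit l b (i + 0) :=
    Finset.sum_range_succ' (fun j => ((Nat.choose (k+1) j : Nat) : ZMod 2) * pvBit l b (i + j)) (k+1)
  have hsplit : ∑ j ∈ Finset.range (k+1), ((Nat.choose (k+1) (j+1) : Nat) : ZMod 2) * pvBit l b (i + (j+1))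
      = ∑ j ∈ Finset.range (k+1), ((Nat.choose k j : Nat) : ZMod 2) * pvBit l b (i + (j+1))
        + ∑ j ∈ Finset.range (k+1), ((Nat.choose k (j+1) : Nat) : ZMod 2) * pvBit l b (i + (j+1)) := by
    rw [← Finset.sum_add_distrib]
    refine Finset.sum_congr rfl (fun j _ => ?_)
    rw [Nat.choose_succ_succ, Nat.cast_add, add_mul]
  have h1 : ∑ j ∈ Finset.range (k+1), ((Nat.choose k j : Nat) : ZMod 2) * pvBit l b (i + (j+1))
      = pvA l b k (i + 1) := by
    refine Finset.sum_congr rfl (fun j _ => ?_)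
    have : i + (j + 1) = i + 1 + j := by omega
    rw [this]
  have h2 : ∑ j ∈ Finset.range (k+1), ((Nat.choose k (j+1) : Nat) : ZMod 2) * pvBit l b (i + (j+1))
      = ∑ j ∈ Finset.range k, ((Nat.choose k (j+1) : Nat) : ZMod 2) * pvBit l b (i + (j+1)) := by
    rw [Finset.sum_range_succ, Nat.choose_succ_self, Nat.cast_zero, zero_mul, add_zero]
  rw [hA, hsplit, h1, h2, Nat.choose_zero_right]
  rw [Nat.choose_zero_right] at key
  push_cast at key ⊢
  linear_combination -key

-- bit b of entry i of the k-times differenced list is a binomial parity sum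
theorem pv_iter_bit (k : Nat) : ∀ (l : List Int) (i b : Nat), i + k < l.length →
    pvInd (((pvStep^[k] l).getD i 0).testBit b) = pvA l b k i := by
  induction k with
  | zero =>
    intro l i b hi
    simp [pvA, pvBit]
  | succ k ih =>
    intro l i b hi
    rw [Function.iterate_succ_apply, ih (pvStep l) i b (by rw [pv_length_step]; omega)]
    have hbit : ∀ j, j < k + 1 → pvBit (pvStep l) b (i + j) = pvBit l b (i + j) + pvBit l b (i + j + 1) := by
      intro j hj
      have hlt : i + j < l.length - 1 := by omega
      unfold pvBit pvStep
      rw [PySem.List.getD_map_range _ _ _ _ hlt]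
      rw [pv_testBit_bxor, pvInd_xor]
    rw [pv_pascal]
    have hS2 : (∑ j ∈ Finset.range (k + 1), ((Nat.choose k j : Nat) : ZMod 2) * pvBit l b (i + j + 1))
        = pvA l b k (i + 1) := by
      refine Finset.sum_congr rfl (fun j _ => ?_)
      have h3 : i + j + 1 = i + 1 + j := by omega
      rw [h3]
    calc pvA (pvStep l) b k i
        = ∑ j ∈ Finset.range (k + 1), ((Nat.choose k j : Nat) : ZMod 2)
            * (pvBit l b (i + j) + pvBit l b (i + j + 1)) :=
          Finset.sum_congr rfl (fun j hj => by rw [hbit j (Finset.mem_range.mp hj)])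
      _ = pvA l b k i + pvA l b k (i + 1) := by
          rw [Finset.sum_congr rfl (fun j _ => mul_add ((Nat.choose k j : Nat) : ZMod 2) _ _),
            Finset.sum_add_distrib, hS2]
          rfl

theorem pv_bit_pvZ (l : List Int) (k b : Nat) :
    pvInd ((pvZ l k).testBit b)
      = ∑ j ∈ Finset.range (k + 1), (if j &&& k = j then (1 : ZMod 2) else 0) * pvBit l b j := by
  unfold pvZ
  rw [pv_testBit_foldl (List.range (k + 1)) (fun j => j &&& k = j) (fun j => l.getD j 0) 0 b]
  rw [show ((0 : Int).testBit b) = false from by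
    rw [show (0 : Int) = Int.ofNat 0 from rfl, pv_testBit_ofNat, Nat.zero_testBit]]
  rw [pv_sum_range (k + 1) (fun j => if j &&& k = j then pvInd ((l.getD j 0).testBit b) else 0)]
  have h0 : pvInd false = 0 := rfl
  rw [h0, zero_add]
  refine Finset.sum_congr rfl (fun j _ => ?_)
  split_ifs with h <;> simp [pvBit]

-- the head of the k-times differenced list IS the closed-form coefficient
theorem pv_val_eq (l : List Int) (k : Nat) (hk : k < l.length) :
    (pvStep^[k] l).getD 0 0 = pvZ l k := by
  apply pv_ext
  intro b
  rw [← pvInd_eq_iff]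
  rw [pv_iter_bit k l 0 b (by omega), pv_bit_pvZ]
  unfold pvA
  refine Finset.sum_congr rfl (fun j _ => ?_)
  rw [pv_lucas k j, zero_add]

-- A's inner buff loop is one triangle step
theorem pv_buff (l : List Int) :
    (List.range (l.length - 1)).foldl
      (fun buff (i : Nat) =>
        buff ++ [PySem.Int.bxor (PySem.List.pyGetD l (i : Int) 0)
          (PySem.List.pyGetD l ((i : Int) + 1) 0)]) []
      = pvStep l := by
  rw [PySem.List.foldl_append_singleton_eq_map, List.nil_append]
  unfold pvStep
  refine List.map_congr_left (fun i hi => ?_)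
  have h1 : ((i : Int) + 1) = ((i + 1 : Nat) : Int) := by push_cast; ring
  rw [h1, PySem.List.pyGetD_natCast, PySem.List.pyGetD_natCast]

-- A's anf computes exactly the closed-form coefficients
theorem pv_anfP (l : List Int) (hl : l ≠ []) :
    anfP l = (List.range l.length).map (pvZ l) := by
  have hlen : 0 < l.length := List.length_pos_iff.mpr hl
  have aux : ∀ t, t ≤ l.length - 1 →
      (List.range t).foldl
        (fun (st : List Int × List Int) _ =>
          let f := st.2
          let buff := (List.range (f.length - 1)).foldl
            (fun buff (i : Nat) =>
              buff ++ [PySem.Int.bxor (PySem.List.pyGetD f (i : Int) 0)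
                (PySem.List.pyGetD f ((i : Int) + 1) 0)]) []
          (st.1 ++ [PySem.List.pyGetD buff 0 0], buff))
        ([PySem.List.pyGetD l 0 0], l)
      = ((List.range (t + 1)).map (fun k => (pvStep^[k] l).getD 0 0), pvStep^[t] l) := by
    intro t
    induction t with
    | zero =>
      intro _
      simp only [List.range_zero, List.foldl_nil, Function.iterate_zero, id_eq]
      rw [PySem.List.pyGetD_zero]
      rfl
    | succ t ih =>
      intro ht
      rw [List.range_succ, List.foldl_append, ih (by omega), List.foldl_cons, List.foldl_nil]
      simp only
      rw [pv_buff (pvStep^[t] l), ← Function.iterate_succ_apply' pvStep t l]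
      rw [PySem.List.pyGetD_zero]
      simp [List.range_succ]
  unfold anfP
  simp only
  rw [aux (l.length - 1) le_rfl]
  simp only
  have h1 : l.length - 1 + 1 = l.length := Nat.sub_add_cancel hlen
  rw [h1]
  refine List.map_congr_left (fun k hk => ?_)
  rw [pv_val_eq l k (List.mem_range.mp hk)]

-- B's _coeff is the same closed form
theorem pv_coeffB_fold (l : List Int) (k : Nat) (js : List Nat) (a : Int) :
    js.foldl
      (fun c (j : Nat) =>
        if PySem.Int.band (j : Int) (k : Int) = (j : Int) then
          PySem.Int.bxor c (PySem.List.pyGetD l (j : Int) 0)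
        else c) a
      = js.foldl (fun c j => if j &&& k = j then PySem.Int.bxor c (l.getD j 0) else c) a := by
  induction js generalizing a with
  | nil => rfl
  | cons j js ih =>
    simp only [List.foldl_cons]
    have hcond : (PySem.Int.band (j : Int) (k : Int) = (j : Int)) ↔ (j &&& k = j) := by
      rw [PySem.Int.band_natCast]
      exact Nat.cast_inj
    by_cases hc : j &&& k = j
    · rw [if_pos (hcond.mpr hc), if_pos hc, PySem.List.pyGetD_natCast]
      exact ih _
    · rw [if_neg (fun hh => hc (hcond.mp hh)), if_neg hc]
      exact ih _

theorem pv_coeffB (l : List Int) (k : Nat) : coeffB l k = pvZ l k := by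
  unfold coeffB pvZ
  exact pv_coeffB_fold l k (List.range (k + 1)) 0

-- the inner loop of functionValue appends one entry to every row
theorem pv_set_map_range {α : Type} (rows t : Nat) (f : Nat → α) (x : α) (ht : t < rows) :
    ((List.range rows).map f).set t x
      = (List.range rows).map (fun fn => if fn = t then x else f fn) := by
  apply List.ext_getElem
  · simp
  · intro i hi hi'
    simp only [List.getElem_set, List.getElem_map, List.getElem_range]
    rcases eq_or_ne t i with rfl | hne
    · rfl
    · rw [if_neg hne, if_neg (Ne.symm hne)]

theorem pv_fv_inner (values : List (List Int)) (e : Nat → Int) (rows : Nat)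
    (hlen : values.length = rows) :
    (List.range rows).foldl
      (fun vals (fn : Nat) =>
        PySem.List.pySetD vals (fn : Int) (PySem.List.pyGetD vals (fn : Int) [] ++ [e fn])) values
      = (List.range rows).map (fun fn => values.getD fn [] ++ [e fn]) := by
  have hbase : values = (List.range rows).map (fun fn => values.getD fn []) := by
    apply List.ext_getElem
    · simp [hlen]
    · intro i hi hi'
      simp only [List.getElem_map, List.getElem_range]
      rw [List.getD_eq_getElem?_getD, List.getElem?_eq_getElem hi]
      rfl
  have aux : ∀ t, t ≤ rows →
      (List.range t).foldl
        (fun vals (fn : Nat) =>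
          PySem.List.pySetD vals (fn : Int) (PySem.List.pyGetD vals (fn : Int) [] ++ [e fn])) values
        = (List.range rows).map
            (fun fn => if fn < t then values.getD fn [] ++ [e fn] else values.getD fn []) := by
    intro t
    induction t with
    | zero =>
      intro _
      simpa using hbase
    | succ t ih =>
      intro ht
      rw [List.range_succ, List.foldl_append, ih (by omega), List.foldl_cons, List.foldl_nil]
      rw [PySem.List.pySetD_natCast, PySem.List.pyGetD_natCast,
        PySem.List.getD_map_range _ _ _ _ (by omega : t < rows),
        pv_set_map_range rows t _ _ (by omega)]
      have hntt : ¬ t < t := by omega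
      rw [if_neg hntt]
      refine List.map_congr_left (fun fn hfn => ?_)
      by_cases h1 : fn = t
      · subst h1
        rw [if_pos rfl, if_pos (by omega)]
      · rw [if_neg h1]
        by_cases h2 : fn < t
        · rw [if_pos h2, if_pos (by omega)]
        · rw [if_neg h2, if_neg (by omega)]
  rw [aux rows le_rfl]
  refine List.map_congr_left (fun fn hfn => ?_)
  rw [if_pos (List.mem_range.mp hfn)]

-- the whole of functionValue, as a map over bit planes
theorem pv_fv_outer (R : Nat) (xs : List Int) : ∀ (P : Nat → List Int),
    xs.foldl
      (fun values (value : Int) =>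
        (List.range R).foldl
          (fun vals (fn : Nat) =>
            PySem.List.pySetD vals (fn : Int)
              (PySem.List.pyGetD vals (fn : Int) [] ++ [PySem.Int.band (value >>> fn) 1])) values)
      ((List.range R).map P)
      = (List.range R).map (fun fn => P fn ++ xs.map (fun (v : Int) => PySem.Int.band (v >>> fn) 1)) := by
  induction xs with
  | nil => intro P; simp
  | cons x xs ih =>
    intro P
    rw [List.foldl_cons]
    rw [pv_fv_inner _ _ R (by simp)]
    have hstep : (List.range R).map
        (fun fn => ((List.range R).map P).getD fn [] ++ [PySem.Int.band (x >>> fn) 1])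
        = (List.range R).map (fun fn => P fn ++ [PySem.Int.band (x >>> fn) 1]) :=
      List.map_congr_left (fun fn hfn =>
        by rw [PySem.List.getD_map_range _ _ _ _ (List.mem_range.mp hfn)])
    rw [hstep, ih (fun fn => P fn ++ [PySem.Int.band (x >>> fn) 1])]
    refine List.map_congr_left (fun fn _ => ?_)
    simp

-- the monomial body A builds at counter value x
def pvMonOf (n : Nat) (x : Int) : List Char :=
  (List.range n).foldl
    (fun mon (j : Nat) =>
      if PySem.Int.band (x >>> j) 1 ≠ 0 then mon ++ ('x' :: PySem.Int.toChars (j : Int)) else mon)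
    []

theorem pv_genMonoms (n : Nat) :
    generateMonomsP n = ['1'] :: (List.range (2 ^ n - 1)).map (fun t => pvMonOf n ((t + 1 : Nat) : Int)) := by
  have aux : ∀ t,
      (List.range t).foldl
        (fun (st : List (List Char) × Int) _ =>
          let mon := (List.range n).foldl
            (fun mon (j : Nat) =>
              if PySem.Int.band (st.2 >>> j) 1 ≠ 0 then mon ++ ('x' :: PySem.Int.toChars (j : Int)) else mon)
            []
          (st.1 ++ [mon], st.2 + 1))
        ([[ '1' ]], 1)
      = (['1'] :: (List.range t).map (fun u => pvMonOf n ((u + 1 : Nat) : Int)), ((t + 1 : Nat) : Int)) := by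
    intro t
    induction t with
    | zero => simp
    | succ t ih =>
      rw [List.range_succ, List.foldl_append, ih, List.foldl_cons, List.foldl_nil]
      simp only [Prod.mk.injEq]
      refine ⟨?_, by push_cast; ring⟩
      simp [pvMonOf, List.map_append]
  unfold generateMonomsP
  rw [aux (2 ^ n - 1)]

theorem pv_foldl_if_append {α : Type} (l : List Nat) (p : Nat → Prop) [DecidablePred p]
    (g : Nat → List α) (acc : List α) :
    l.foldl (fun a j => if p j then a ++ g j else a) acc
      = acc ++ l.flatMap (fun j => if p j then g j else []) := by
  induction l generalizing acc with
  | nil => simp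
  | cons x l ih =>
    simp only [List.foldl_cons, List.flatMap_cons]
    by_cases h : p x
    · rw [if_pos h, if_pos h, ih, List.append_assoc]
    · rw [if_neg h, if_neg h, ih, List.nil_append]

theorem pv_flatMap_filter {α : Type} (l : List Nat) (p : Nat → Prop) [DecidablePred p]
    (g : Nat → List α) :
    l.flatMap (fun j => if p j then g j else []) = (l.filter (fun j => decide (p j))).flatMap g := by
  induction l with
  | nil => rfl
  | cons x l ih =>
    simp only [List.flatMap_cons, List.filter_cons]
    by_cases h : p x
    · simp only [h, if_pos, decide_true, List.flatMap_cons, ih]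
    · simp only [h, if_neg, decide_false, ih]
      simp [h]

theorem pv_cond_bit (x j : Nat) : (PySem.Int.band (((x : Nat) : Int) >>> j) 1 ≠ 0) ↔ x.testBit j = true := by
  rw [← Int.natCast_shiftRight, show (1 : Int) = ((1 : Nat) : Int) from rfl, PySem.Int.band_natCast,
    pv_shift_and_one]
  split_ifs with h <;> simp [h]

theorem pv_monOf_eq (n x : Nat) (hx : x ≠ 0) (hlt : x < 2 ^ n) :
    pvMonOf n ((x : Nat) : Int) = monomB x := by
  unfold pvMonOf monomB
  rw [if_neg hx]
  rw [pv_foldl_if_append (List.range n) _ _ [], List.nil_append]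
  have hcond : ∀ (j : Nat), (PySem.Int.band (((x : Nat) : Int) >>> j) 1 ≠ 0) ↔ x.testBit j = true :=
    fun j => pv_cond_bit x j
  have hsize : x.size ≤ n := Nat.size_le.mpr hlt
  have hn : n = x.size + (n - x.size) := by omega
  rw [hn, List.range_add, List.flatMap_append]
  have htail : ((List.range (n - x.size)).map (fun k => x.size + k)).flatMap
      (fun (j : Nat) => if PySem.Int.band (((x : Nat) : Int) >>> j) 1 ≠ 0 then 'x' :: PySem.Int.toChars (j : Int) else []) = [] := by
    apply List.flatMap_eq_nil_iff.mpr
    intro j hj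
    obtain ⟨k, hk, rfl⟩ := List.mem_map.mp hj
    have hnc : ¬ (PySem.Int.band (((x : Nat) : Int) >>> (x.size + k)) 1 ≠ 0) := by
      rw [hcond]
      simp [pv_testBit_ge_size x _ (by omega : x.size ≤ x.size + k)]
    rw [if_neg hnc]
  rw [htail, List.append_nil]
  have hbl : PySem.Int.bitLength ((x : Nat) : Int) = x.size := pv_bitLength_eq_size x
  rw [hbl]
  rw [pv_flatMap_filter (List.range x.size) (fun (j : Nat) => PySem.Int.band (((x : Nat) : Int) >>> j) 1 ≠ 0)
    (fun b => 'x' :: PySem.Int.toChars (b : Int))]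

theorem pv_join {α : Type} (s : List α) (ms : List (List α)) (h : ms ≠ []) :
    (ms.map (· ++ s)).flatten = List.intercalate s ms ++ s := by
  induction ms with
  | nil => cases h rfl
  | cons m ms ih =>
    cases ms with
    | nil => simp [List.intercalate]
    | cons m2 ms2 =>
      have hcc : List.intercalate s (m :: m2 :: ms2) = m ++ s ++ List.intercalate s (m2 :: ms2) := by
        simp [List.intercalate, List.intersperse]
      rw [List.map_cons, List.flatten_cons, ih (by simp), hcc]
      simp [List.append_assoc]

theorem pv_flatMap_eq_flatten_map {α : Type} (idx : List Nat) (g : Nat → List α) (s : List α) :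
    idx.flatMap (fun j => g j ++ s) = ((idx.map g).map (· ++ s)).flatten := by
  rw [List.map_map]
  rw [List.flatMap_def]
  rfl

theorem pv_take_append (acc rest : List Char) (h : 3 ≤ rest.length) :
    (acc ++ rest).take ((acc ++ rest).length - 3) = acc ++ rest.take (rest.length - 3) := by
  rw [List.length_append, List.take_append]
  have h1 : acc.length + rest.length - 3 - acc.length = rest.length - 3 := by omega
  have h2 : (acc.length + rest.length - 3) ≥ acc.length := by omega
  rw [List.take_of_length_le h2, h1]

theorem pv_take_sep (X s : List Char) (h : s.length = 3) :
    (X ++ s).take ((X ++ s).length - 3) = X := by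
  rw [List.length_append, h]
  have h1 : X.length + 3 - 3 = X.length := by omega
  rw [h1, List.take_left]

theorem pv_monoms_getD (nb j : Nat) (hj : j < 2 ^ nb) :
    (generateMonomsP nb).getD j [] = monomB j := by
  rw [pv_genMonoms]
  cases j with
  | zero => rfl
  | succ u =>
    show ((List.range (2 ^ nb - 1)).map (fun t => pvMonOf nb ((t + 1 : Nat) : Int))).getD u [] = _
    rw [PySem.List.getD_map_range _ _ _ _ (by omega : u < 2 ^ nb - 1)]
    exact pv_monOf_eq nb (u + 1) (by omega) hj

theorem pv_slice_trim (xs : List Char) (h : 3 ≤ xs.length) :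
    PySem.List.slice xs (some 0) (some ((xs.length : Int) - 3)) = xs.take (xs.length - 3) := by
  rw [PySem.List.slice_zero_start]
  rw [PySem.List.slice_to xs (show (0 : Int) ≤ (xs.length : Int) - 3 by omega)]
  congr 1
  omega

theorem pv_trim_line (big acc X s : List Char) (hbig : big = acc ++ (X ++ s)) (hs : s.length = 3) :
    PySem.List.slice big (some 0) (some ((big.length : Int) - 3)) = acc ++ X := by
  subst hbig
  rw [pv_slice_trim _ (by simp only [List.length_append, hs]; omega)]
  rw [pv_take_append acc (X ++ s) (by simp [hs])]
  rw [pv_take_sep X s hs]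

theorem pv_outer_fold (NB : Nat) (stepf : List Char × Int → Nat → List Char × Int)
    (g : Nat → List Char)
    (hstep : ∀ (acc : List Char) (t : Nat), t < NB →
      stepf (acc, ((t : Nat) : Int)) t = (acc ++ (g t ++ ['\n']), ((t + 1 : Nat) : Int))) :
    (List.range NB).foldl stepf ([], (0 : Int))
      = (((List.range NB).map (fun i => g i ++ ['\n'])).flatten, ((NB : Nat) : Int)) := by
  have aux : ∀ t, t ≤ NB → (List.range t).foldl stepf ([], (0 : Int))
      = (((List.range t).map (fun i => g i ++ ['\n'])).flatten, ((t : Nat) : Int)) := by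
    intro t
    induction t with
    | zero => intro _; simp
    | succ t ih =>
      intro ht
      rw [List.range_succ, List.foldl_append, ih (by omega), List.foldl_cons, List.foldl_nil]
      rw [hstep _ t (by omega)]
      simp [List.map_append]
  exact aux NB le_rfl

theorem pv_join2 {β : Type} (s : List Char) (xs : List β) (g : β → List Char) (h : xs ≠ []) :
    (xs.map (fun x => g x ++ s)).flatten = List.intercalate s (xs.map g) ++ s := by
  have h2 : xs.map (fun x => g x ++ s) = (xs.map g).map (· ++ s) := by
    rw [List.map_map]; rfl
  rw [h2]
  exact pv_join s (xs.map g) (by simpa using h)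

theorem pv_toDigits_ne_nil (x : Nat) : Nat.toDigits 2 x ≠ [] := by
  unfold Nat.toDigits
  have key : ∀ fuel n (acc : List Char), n < fuel → Nat.toDigitsCore 2 fuel n acc ≠ [] := by
    intro fuel
    induction fuel with
    | zero => intro n acc h; omega
    | succ fuel ih =>
      intro n acc h
      rw [Nat.toDigitsCore]
      by_cases h2 : n / 2 = 0
      · simp [h2]
      · rw [if_neg h2]
        exact ih (n / 2) _ (by omega)
  exact key (x + 1) x [] (by omega)

-- num_of_bits is never 0 (bin always prints a digit)
theorem pv_NB_pos (m : Int) : 0 < pvNB m := by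
  unfold pvNB PySem.Int.toBinChars0b
  split_ifs with h
  · simp
  · simpa using List.length_pos_iff.mpr (pv_toDigits_ne_nil m.toNat)

-- A's inner monomial fold for one line
theorem pv_fold_lineA (l : List Int) (i nb : Nat) (hi : i < nb)
    (hbig : ∀ j, j < l.length → 2 ^ nb ≤ j → PySem.Int.band (pvZ l j >>> i) 1 = 0)
    (idx : List Nat) (hidx : ∀ j ∈ idx, j < l.length) : ∀ acc : List Char,
    idx.foldl
      (fun answer (j : Nat) =>
        if PySem.List.pyGetD ((List.range l.length).map
            (fun j => PySem.Int.band (pvZ l j >>> i) 1)) (j : Int) 0 ≠ 0 then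
          answer ++ PySem.List.pyGetD (generateMonomsP nb) (j : Int) [] ++ (' ' :: '⊕' :: ' ' :: [])
        else answer) acc
      = acc ++ idx.flatMap
          (fun j => if (pvZ l j).testBit i = true then monomB j ++ (' ' :: '⊕' :: ' ' :: []) else []) := by
  induction idx with
  | nil => intro acc; simp
  | cons j idx ih =>
    intro acc
    have hjn : j < l.length := hidx j (by simp)
    rw [List.foldl_cons, List.flatMap_cons]
    rw [PySem.List.pyGetD_natCast, PySem.List.pyGetD_natCast,
      PySem.List.getD_map_range _ _ _ _ hjn]
    by_cases hb : (pvZ l j).testBit i = true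
    · have hjlt : j < 2 ^ nb := by
        by_contra hge
        have h0 := hbig j hjn (by omega)
        exact (pv_cond_bitI (pvZ l j) i).mpr hb h0
      rw [if_pos ((pv_cond_bitI (pvZ l j) i).mpr hb), if_pos hb,
        pv_monoms_getD nb j hjlt,
        ih (fun x hx => hidx x (by simp [hx])) _]
      simp [List.append_assoc]
    · rw [if_neg (fun hh => hb ((pv_cond_bitI (pvZ l j) i).mp hh)), if_neg hb,
        ih (fun x hx => hidx x (by simp [hx])) _]
      simp

-- the main equivalence on Pre_
theorem pv_main (l : List Int) (hl : l ≠ [])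
    (hR : pvNB ((PySem.List.max? l id).getD 0) ≤
      pvNB ((PySem.List.max? ((List.range l.length).map (pvZ l)) id).getD 0))
    (hbig : ∀ j < l.length, 2 ^ pvNB ((PySem.List.max? l id).getD 0) ≤ j →
      ∀ i < pvNB ((PySem.List.max? l id).getD 0), PySem.Int.band (pvZ l j >>> i) 1 = 0) :
    buildSFunction l = buildSFunction_alt l := by
  have hn : 0 < l.length := List.length_pos_iff.mpr hl
  set NB := pvNB ((PySem.List.max? l id).getD 0) with hNBdef
  set R := pvNB ((PySem.List.max? ((List.range l.length).map (pvZ l)) id).getD 0) with hRdef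
  have hCL : anfP l = (List.range l.length).map (pvZ l) := pv_anfP l hl
  have hrep : List.replicate R ([] : List Int)
      = (List.range R).map (fun _ => ([] : List Int)) := by
    apply List.ext_getElem
    · simp
    · intro i hi hi'
      simp
  have hFV : functionValueP (anfP l)
      = (List.range R).map
          (fun (fn : Nat) => ((List.range l.length).map (pvZ l)).map
            (fun (w : Int) => PySem.Int.band (w >>> fn) 1)) := by
    simp only [functionValueP, hCL]
    rw [← hRdef, hrep, pv_fv_outer]
    refine List.map_congr_left (fun fn _ => ?_)
    rw [List.nil_append]
  have hrow : ∀ i, i < NB →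
      PySem.List.pyGetD (functionValueP (anfP l)) (i : Int) []
        = (List.range l.length).map (fun j => PySem.Int.band (pvZ l j >>> i) 1) := by
    intro i hi
    rw [hFV, PySem.List.pyGetD_natCast]
    rw [PySem.List.getD_map_range _ _ _ _ (by omega : i < R)]
    rw [List.map_map]
    rfl
  have hcoeffs : (List.range l.length).map (coeffB l) = (List.range l.length).map (pvZ l) :=
    List.map_congr_left (fun k _ => pv_coeffB l k)
  -- one line of output: A's trimmed fold equals acc ++ lineB
  have hline : ∀ (i : Nat), i < NB → ∀ acc : List Char,
      PySem.List.slice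
        ((List.range l.length).foldl
          (fun answer (j : Nat) =>
            if PySem.List.pyGetD (PySem.List.pyGetD (functionValueP (anfP l)) (i : Int) []) (j : Int) 0 ≠ 0 then
              answer ++ PySem.List.pyGetD (generateMonomsP NB) (j : Int) []
                ++ (' ' :: '⊕' :: ' ' :: [])
            else answer)
          (acc ++ ('y' :: PySem.Int.toChars (i : Int)) ++ (' ' :: '=' :: ' ' :: [])))
        (some 0) (some ((((List.range l.length).foldl
          (fun answer (j : Nat) =>
            if PySem.List.pyGetD (PySem.List.pyGetD (functionValueP (anfP l)) (i : Int) []) (j : Int) 0 ≠ 0 then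
              answer ++ PySem.List.pyGetD (generateMonomsP NB) (j : Int) []
                ++ (' ' :: '⊕' :: ' ' :: [])
            else answer)
          (acc ++ ('y' :: PySem.Int.toChars (i : Int)) ++ (' ' :: '=' :: ' ' :: []))).length : Int) - 3))
      = acc ++ lineB i ((List.range l.length).map (coeffB l)) l.length := by
    intro i hi acc
    rw [hrow i hi]
    have hbody := pv_fold_lineA l i NB hi (fun j hj hge => hbig j hj hge i hi)
      (List.range l.length) (fun j hj => List.mem_range.mp hj)
      (acc ++ ('y' :: PySem.Int.toChars (i : Int)) ++ (' ' :: '=' :: ' ' :: []))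
    rw [hbody]
    have hmons : ((List.range l.length).filter
          (fun (j : Nat) => decide (PySem.Int.band
            (PySem.List.pyGetD ((List.range l.length).map (coeffB l)) (j : Int) 0 >>> i) 1 ≠ 0))).map monomB
        = ((List.range l.length).filter (fun j => decide ((pvZ l j).testBit i = true))).map monomB := by
      congr 1
      refine List.filter_congr (fun j hj => ?_)
      have hjn : j < l.length := List.mem_range.mp hj
      rw [hcoeffs, PySem.List.pyGetD_natCast, PySem.List.getD_map_range _ _ _ _ hjn,
        decide_eq_decide]
      exact pv_cond_bitI (pvZ l j) i
    simp only [lineB]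
    rw [hmons]
    rcases hsel : (List.range l.length).filter (fun j => decide ((pvZ l j).testBit i = true)) with _ | ⟨s0, stl⟩
    · have hflat : (List.range l.length).flatMap
          (fun j => if (pvZ l j).testBit i = true then monomB j ++ (' ' :: '⊕' :: ' ' :: []) else []) = [] := by
        rw [pv_flatMap_filter (List.range l.length)
          (fun j => (pvZ l j).testBit i = true) (fun j => monomB j ++ (' ' :: '⊕' :: ' ' :: [])), hsel]
        rfl
      rw [hflat]
      rw [pv_trim_line _ acc ('y' :: PySem.Int.toChars (i : Int)) (' ' :: '=' :: ' ' :: [])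
        (by simp [List.append_assoc]) rfl]
      rw [if_neg (by simp)]
    · have hflat : (List.range l.length).flatMap
          (fun j => if (pvZ l j).testBit i = true then monomB j ++ (' ' :: '⊕' :: ' ' :: []) else []) =
          List.intercalate (' ' :: '⊕' :: ' ' :: []) ((s0 :: stl).map monomB) ++ (' ' :: '⊕' :: ' ' :: []) := by
        rw [pv_flatMap_filter (List.range l.length)
          (fun j => (pvZ l j).testBit i = true) (fun j => monomB j ++ (' ' :: '⊕' :: ' ' :: [])), hsel]
        rw [pv_flatMap_eq_flatten_map]
        exact pv_join _ _ (by simp)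
      rw [hflat]
      rw [pv_trim_line _ acc
        (('y' :: PySem.Int.toChars (i : Int)) ++ ((' ' :: '=' :: ' ' :: []) ++
          List.intercalate (' ' :: '⊕' :: ' ' :: []) ((s0 :: stl).map monomB)))
        (' ' :: '⊕' :: ' ' :: [])
        (by simp [List.append_assoc]) rfl]
      rw [if_pos (by simp)]
      simp [List.append_assoc]
  -- assemble both sides
  simp only [buildSFunction, buildSFunction_alt]
  rw [← hNBdef]
  rw [pv_outer_fold NB _
    (fun i => lineB i ((List.range l.length).map (coeffB l)) l.length)
    (by
      intro acc t ht
      simp only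
      rw [hline t (by omega) acc]
      refine congrArg₂ Prod.mk ?_ ?_
      · rw [List.append_assoc]
      · push_cast; ring)]
  simp only
  congr 1
  rw [pv_join2 ['\n'] (List.range NB)
    (fun i => lineB i ((List.range l.length).map (coeffB l)) l.length)
    (by
      simp only [ne_eq, List.range_eq_nil]
      have := pv_NB_pos ((PySem.List.max? l id).getD 0)
      omega)]

-- ===== VERDICT (by name: the statement is the Claim_ definition above) =====
theorem buildSFunction_spec : Claim_equal_buildSFunction := by
  intro function hdom hpre
  unfold Spec_buildSFunction
  obtain ⟨hne, hR, hbig⟩ := hpre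
  exact pv_main function hne hR hbig
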